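-- pv_equiv track=rewrite | github.com/navyCK/- | Level1/폰켓몬/my.py | solution
-- ===== SOURCE A (Python) =====
-- def solution(nums):
--     answer = 0
--     length = len(nums) // 2
--     temp = list(set(nums))
--
--     for value in temp :
--         if(answer < length):
--             answer +=1
--
--     return answer
-- ===== SOURCE B (Python) =====
-- def solution(nums):
--     return min(len(set(nums)), len(nums) // 2)
-- ===== Notes on version B (the rewrite author's own statement) =====
-- stated objective: simpler
-- what changed: Replaces the capped counting loop over the deduplicated list with the closed form min(len(set(nums)), len(nums)//2).
import Mathlib
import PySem

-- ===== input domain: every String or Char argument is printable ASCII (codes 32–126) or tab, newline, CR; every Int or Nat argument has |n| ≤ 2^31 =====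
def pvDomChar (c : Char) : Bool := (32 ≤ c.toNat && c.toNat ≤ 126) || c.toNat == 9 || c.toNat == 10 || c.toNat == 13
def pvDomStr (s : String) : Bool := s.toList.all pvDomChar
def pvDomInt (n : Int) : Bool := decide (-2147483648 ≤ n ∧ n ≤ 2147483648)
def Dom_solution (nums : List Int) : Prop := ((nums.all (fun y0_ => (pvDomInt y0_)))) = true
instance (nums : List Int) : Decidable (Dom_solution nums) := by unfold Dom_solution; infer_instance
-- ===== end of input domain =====

-- ===== PORT A =====
-- B replaces the capped counting loop with the closed form min(|set(nums)|, len//2).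
def solution (nums : List Int) : Int :=
  let length : Int := PySem.Int.floordiv (nums.length : Int) 2
  let temp : List Int := PySem.Set.ofList nums
  temp.foldl (fun answer _ => if answer < length then answer + 1 else answer) 0

-- ===== PORT B =====
def solution_alt (nums : List Int) : Int :=
  min ((PySem.Set.ofList nums).length : Int) (PySem.Int.floordiv (nums.length : Int) 2)

-- ===== PRECONDITION & SPEC =====
def Spec_solution (nums : List Int) (out : Int) : Prop := out = solution_alt nums
instance (nums : List Int) (out : Int) : Decidable (Spec_solution nums out) := by unfold Spec_solution; infer_instance

-- ===== CLAIM (what is proved, stated in full; the proofs are below) =====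
def Claim_equal_solution : Prop := ∀ (nums : List Int), Dom_solution nums → Spec_solution nums (solution nums)

-- ===== LEMMAS AND PROOFS =====

-- ===== VERDICT (by name: the statement is the Claim_ definition above) =====
lemma cap_foldl (L : Int) (l : List Int) (a : Int) (h : a ≤ L) :
    l.foldl (fun answer _ => if answer < L then answer + 1 else answer) a
      = min (a + l.length) L := by
  induction l generalizing a with
  | nil => simp; omega
  | cons x xs ih =>
    simp only [List.foldl_cons, List.length_cons]
    by_cases hlt : a < L
    · rw [if_pos hlt, ih (a + 1) (by omega)]; push_cast; omega
    · rw [if_neg hlt, ih a h]; push_cast; omega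

theorem solution_spec : Claim_equal_solution := by
  intro nums _
  unfold Spec_solution solution solution_alt
  have h0 : (0:Int) ≤ PySem.Int.floordiv (nums.length : Int) 2 := by
    rw [PySem.Int.floordiv_eq_ediv_of_pos (by omega)]; positivity
  rw [cap_foldl _ _ _ h0]
  omega
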